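-- pv_equiv track=rewrite | github.com/whyj107/CodeWar | 20221019_Simple Fun 154 Zero And One.py | zero_and_one
-- ===== SOURCE A (Python) =====
-- def zero_and_one(s):
--     result = []
--     for i in s:
--         if not result:
--             result.append(i)
--         elif result[-1] != i and result[-1] != ' ':
--             result[-1] = ' '
--         else:
--             result.append(i)
--     return result.count('1') + result.count('0')
-- ===== SOURCE B (Python) =====
-- def zero_and_one(s):
--     # Two-pointer pair-skipping scan: a char and a differing successor cancel
--     # (unless the char is a literal space, which A can never overwrite), so we
--     # jump two positions; otherwise we count the char if it is '0' or '1'.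
--     count = 0
--     j = 0
--     n = len(s)
--     while j < n:
--         if j + 1 < n and s[j] != ' ' and s[j + 1] != s[j]:
--             j += 2
--         else:
--             if s[j] == '0' or s[j] == '1':
--                 count += 1
--             j += 1
--     return count
-- ===== Notes on version B (the rewrite author's own statement) =====
-- stated objective: simpler
-- what changed: Replaces A's growing result list plus two final count passes by a single two-pointer index scan that skips a cancelling pair (a non-space character followed by a different character) in one jump and otherwise tallies zero/one characters into one integer.
import Mathlib
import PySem

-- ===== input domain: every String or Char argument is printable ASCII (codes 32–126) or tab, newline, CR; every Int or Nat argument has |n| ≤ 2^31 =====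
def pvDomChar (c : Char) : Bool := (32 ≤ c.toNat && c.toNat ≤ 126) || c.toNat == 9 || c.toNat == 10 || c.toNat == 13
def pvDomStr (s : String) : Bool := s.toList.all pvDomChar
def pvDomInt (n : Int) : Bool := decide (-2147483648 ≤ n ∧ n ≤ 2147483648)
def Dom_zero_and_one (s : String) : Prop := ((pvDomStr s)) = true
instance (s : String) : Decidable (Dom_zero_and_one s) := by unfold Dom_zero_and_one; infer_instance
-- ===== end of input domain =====

-- B replaces A's growing list + two final .count passes by a single two-pointer
-- pair-skipping scan over the string keeping one integer counter (objective: simpler).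

-- ===== PORT A =====
-- one loop step of A; 'result' is kept head-first (Python's list reversed), so
-- Python's result[-1] is the head; only the head and the order-independent
-- counts of the final list are ever used.
def zero_and_one_step (result : List Char) (i : Char) : List Char :=
  match result with
  | [] => [i]
  | top :: rest => if top ≠ i ∧ top ≠ ' ' then ' ' :: rest else i :: top :: rest

def zero_and_one (s : String) : Int :=
  let result := s.toList.foldl zero_and_one_step []
  PySem.List.count result '1' + PySem.List.count result '0'

-- ===== PORT B =====
-- Source B's while loop over index j, as the obvious recursion on the remaining
-- suffix s[j:]: skipping two positions drops two elements, one position drops one.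
def zero_and_one_alt_go : List Char → Int → Int
  | [], count => count
  | [c], count => count + (if c = '0' ∨ c = '1' then 1 else 0)
  | c :: d :: rest, count =>
    if c ≠ ' ' ∧ d ≠ c then zero_and_one_alt_go rest count
    else zero_and_one_alt_go (d :: rest) (count + (if c = '0' ∨ c = '1' then 1 else 0))

def zero_and_one_alt (s : String) : Int := zero_and_one_alt_go s.toList 0

-- ===== PRECONDITION & SPEC =====
def Spec_zero_and_one (s : String) (out : Int) : Prop := out = zero_and_one_alt s
instance (s : String) (out : Int) : Decidable (Spec_zero_and_one s out) := by unfold Spec_zero_and_one; infer_instance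

-- ===== CLAIM (what is proved, stated in full; the proofs are below) =====
def Claim_equal_zero_and_one : Prop := ∀ (s : String), Dom_zero_and_one s → Spec_zero_and_one s (zero_and_one s)

-- ===== LEMMAS AND PROOFS =====

-- number of '0'/'1' entries of a list, as one fold (proof-side helper)
def pvCount01 : List Char → Int
  | [] => 0
  | c :: r => (if c = '0' ∨ c = '1' then 1 else 0) + pvCount01 r

theorem pvCount01_eq (l : List Char) :
    PySem.List.count l '1' + PySem.List.count l '0' = pvCount01 l := by
  induction l with
  | nil => simp [PySem.List.count, pvCount01]
  | cons c r ih =>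
    simp only [PySem.List.count, List.count_cons, pvCount01] at *
    by_cases h1 : c = '1' <;> by_cases h0 : c = '0' <;>
      simp_all <;> omega

-- main invariant: folding A's step from a state with freshly pushed top 'c'
-- computes what B's scan computes on 'c :: rest'.
theorem pvInv (n : Nat) : ∀ (rest : List Char), rest.length ≤ n →
    ∀ (c : Char) (acc : List Char) (k : Int),
    pvCount01 (List.foldl zero_and_one_step (c :: acc) rest) + k =
      pvCount01 acc + zero_and_one_alt_go (c :: rest) k := by
  induction n with
  | zero =>
    intro rest hlen c acc k
    have : rest = [] := List.eq_nil_of_length_eq_zero (Nat.le_zero.mp hlen)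
    subst this
    simp [zero_and_one_alt_go, pvCount01]; ring
  | succ n ih =>
    intro rest hlen c acc k
    match rest with
    | [] => simp [zero_and_one_alt_go, pvCount01]; ring
    | d :: rest2 =>
      by_cases hc : c ≠ ' ' ∧ d ≠ c
      · -- A replaces the top with ' '; B skips both characters
        have hstep : zero_and_one_step (c :: acc) d = ' ' :: acc := by
          simp [zero_and_one_step, hc.1, Ne.symm hc.2]
        simp only [List.foldl_cons, hstep, zero_and_one_alt_go, if_pos hc]
        match rest2 with
        | [] => simp [zero_and_one_alt_go, pvCount01]
        | e :: r3 =>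
          have hstep2 : zero_and_one_step (' ' :: acc) e = e :: ' ' :: acc := by
            simp [zero_and_one_step]
          simp only [List.foldl_cons, hstep2]
          have h3 : r3.length ≤ n := by
            simp at hlen; omega
          have := ih r3 h3 e (' ' :: acc) k
          simpa [pvCount01] using this
      · -- A appends d on top of c; B counts c and moves one position
        have hc' : ¬(c ≠ d ∧ c ≠ ' ') := fun h => hc ⟨h.2, fun hdc => h.1 hdc.symm⟩
        have hstep : zero_and_one_step (c :: acc) d = d :: c :: acc := by
          simp only [zero_and_one_step, if_neg hc']
        simp only [List.foldl_cons, hstep, zero_and_one_alt_go, if_neg hc]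
        have h2 : rest2.length ≤ n := by simp at hlen; omega
        have := ih rest2 h2 d (c :: acc) (k + (if c = '0' ∨ c = '1' then 1 else 0))
        simp only [pvCount01] at this
        omega

-- ===== VERDICT (by name: the statement is the Claim_ definition above) =====
theorem zero_and_one_spec : Claim_equal_zero_and_one := by
  intro s _
  unfold Spec_zero_and_one zero_and_one zero_and_one_alt
  rw [pvCount01_eq]
  match h : s.toList with
  | [] => simp [zero_and_one_alt_go, pvCount01]
  | c :: rest =>
    have hstep : zero_and_one_step [] c = [c] := rfl
    simp only [List.foldl_cons, hstep]
    have := pvInv rest.length rest (le_refl _) c [] 0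
    simpa [pvCount01] using this
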